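-- pv_equiv track=rewrite | github.com/nachiketapatil/NLP-Assign-2-CRF | CRF Implementation.py | preprocess_sent
-- ===== SOURCE A (Python) =====
-- def preprocess_sent(sent):
--     words = sent.split()
--     exception_punc = ['\'', '-']
--     proc_words = []
--     for w in words:
--         if (w == " "):
--             continue
--         else:
--             if (w != "I"):
--                 w = w.lower()
--             s = 0
--             n = len(w)
--             for i in range(n):
--                 if (w[i].isalnum()):
--                     continue
--                 elif (w[i] not in exception_punc):
--                     proc_words.append(w[s:i])
--                     proc_words.append(w[i])
--                     s = i+1
--             if (s < n):
--                 proc_words.append(w[s:])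
--     if (proc_words[-1].isalnum()):
--         proc_words.append(".")
--     proc_words[0] = proc_words[0].capitalize()
--     for ele in proc_words:
--         if (ele == ''):
--             proc_words.remove(ele)
--     return (proc_words)
-- ===== SOURCE B (Python) =====
-- import re
--
-- def preprocess_sent(sent):
--     proc_words = []
--     for w in sent.split():
--         if w != "I":
--             w = w.lower()
--         # split keeping each single non-alphanumeric delimiter except ' and -
--         parts = re.split(r"([^0-9A-Za-z'\-])", w)
--         if parts[-1] == '':
--             parts.pop()
--         proc_words.extend(parts)
--     if proc_words[-1].isalnum():
--         proc_words.append(".")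
--     proc_words[0] = proc_words[0].capitalize()
--     return [p for p in proc_words if p != '']
-- ===== Notes on version B (the rewrite author's own statement) =====
-- stated objective: idiomatic
-- what changed: Per word, A's index loop with slice bookkeeping (running segment start s) is replaced by a regex-style split that keeps single non-alphanumeric delimiters (except ' and -), and A's remove-during-iteration empty-string purge (each remove rescans the list) is replaced by a single filter comprehension, provably equal because empty segments are never adjacent.
import Mathlib
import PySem

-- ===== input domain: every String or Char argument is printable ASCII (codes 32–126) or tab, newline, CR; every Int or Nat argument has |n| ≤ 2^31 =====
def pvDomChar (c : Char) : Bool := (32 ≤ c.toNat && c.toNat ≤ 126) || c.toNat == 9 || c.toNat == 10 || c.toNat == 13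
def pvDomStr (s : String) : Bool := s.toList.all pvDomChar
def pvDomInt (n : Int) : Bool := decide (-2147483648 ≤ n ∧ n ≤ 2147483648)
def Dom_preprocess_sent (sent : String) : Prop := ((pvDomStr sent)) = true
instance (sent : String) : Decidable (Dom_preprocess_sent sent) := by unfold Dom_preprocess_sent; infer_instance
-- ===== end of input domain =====

-- B replaces A's index-based inner scan (slice bookkeeping with a running start s)
-- by a keep/delimiter split of each word (a port of Source B's re.split on a single-char
-- class) and replaces A's remove-during-iteration loop by a filter.

-- ===== PORT A =====
-- str.capitalize, exact on the ASCII domain (first char uppercased, rest lowercased);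
-- both Pythons call .capitalize(), so both ports use this helper
def pvCapitalize (cs : List Char) : List Char :=
  match cs with
  | [] => []
  | c :: t => PySem.Chars.upperChar c :: PySem.Chars.lower t

-- CPython-exact port of "for ele in proc_words: if ele == '': proc_words.remove(ele)":
-- the cursor i advances by one each iteration over the mutating list; the loop runs at
-- most (initial length) times, which the fuel argument supplies
def pvRemoveLoop (l : List (List Char)) (i : Nat) : Nat → List (List Char)
  | 0 => l
  | fuel + 1 =>
    if i < l.length then
      pvRemoveLoop (if l.getD i [] = [] then (PySem.List.remove? l []).getD l else l)
        (i + 1) fuel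
    else l

-- body of A's inner "for i in range(n)" loop; state = (s, proc_words); w[i] is
-- w.getD i ' ' (always 0 ≤ i < n here, so exactly Python's w[i])
def pvInnerA (w : List Char) (st : Nat × List (List Char)) (i : Nat) : Nat × List (List Char) :=
  if PySem.Chars.isalnum (w.getD i ' ') then st
  else if w.getD i ' ' ∉ (['\'', '-'] : List Char) then
    (i + 1, st.2 ++ [PySem.List.slice w (some (st.1 : Int)) (some (i : Int)), [w.getD i ' ']])
  else st

-- body of A's outer "for w in words" loop
def pvStepA (proc : List (List Char)) (w0 : List Char) : List (List Char) :=
  if w0 = [' '] then proc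
  else
    let w := if w0 ≠ ['I'] then PySem.Chars.lower w0 else w0
    let n := w.length
    let st := (List.range n).foldl (pvInnerA w) (0, proc)
    if st.1 < n then st.2 ++ [PySem.List.slice w (some (st.1 : Int)) none] else st.2

def preprocess_sent (sent : String) : List String :=
  let words := PySem.Chars.split₀ sent.toList
  let proc0 := words.foldl pvStepA []
  let proc1 := if PySem.Chars.strIsalnum (proc0.getLast?.getD []) then proc0 ++ [['.']] else proc0
  -- proc_words[0] = proc_words[0].capitalize(); proc1 = [] only outside Pre_
  let proc2 := match proc1 with
    | [] => []
    | h :: t => pvCapitalize h :: t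
  (pvRemoveLoop proc2 0 proc2.length).map String.ofList

-- ===== PORT B =====
-- the character class [0-9A-Za-z'-] kept together by Source B's re.split
def pvIsKeep (c : Char) : Bool := PySem.Chars.isalnum c || c = '\'' || c = '-'

-- hand port of re.split(r"([^0-9A-Za-z'\-])", w), exact for this pattern (a capturing
-- class matching one character): segments alternate with single-character delimiters,
-- with empty segments around/between adjacent delimiters
def pvReSplit : List Char → List (List Char)
  | [] => [[]]
  | c :: t =>
    if pvIsKeep c then
      match pvReSplit t with
      | [] => [[c]]        -- unreachable: pvReSplit never returns []
      | seg :: rest => (c :: seg) :: rest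
    else [] :: [c] :: pvReSplit t

-- body of Source B's "for w in sent.split()" loop
def pvStepB (proc : List (List Char)) (w0 : List Char) : List (List Char) :=
  let w := if w0 ≠ ['I'] then PySem.Chars.lower w0 else w0
  let parts := pvReSplit w
  let parts := if parts.getLast?.getD [] = [] then parts.dropLast else parts
  proc ++ parts

def preprocess_sent_alt (sent : String) : List String :=
  let proc0 := (PySem.Chars.split₀ sent.toList).foldl pvStepB []
  let proc1 := if PySem.Chars.strIsalnum (proc0.getLast?.getD []) then proc0 ++ [['.']] else proc0
  let proc2 := match proc1 with
    | [] => []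
    | h :: t => pvCapitalize h :: t
  (proc2.filter (· ≠ [])).map String.ofList

-- ===== PRECONDITION & SPEC =====
-- Pre_ excludes only whitespace-only sentences: there sent.split() == [] and both
-- Pythons raise IndexError on proc_words[-1]
def Pre_preprocess_sent (sent : String) : Prop := PySem.Chars.split₀ sent.toList ≠ []
instance (sent : String) : Decidable (Pre_preprocess_sent sent) := by
  unfold Pre_preprocess_sent; infer_instance
def pvWitness_preprocess_sent : String := "Hello, world"

def Spec_preprocess_sent (sent : String) (out : List String) : Prop := out = preprocess_sent_alt sent
instance (sent : String) (out : List String) : Decidable (Spec_preprocess_sent sent out) := by unfold Spec_preprocess_sent; infer_instance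

-- ===== CLAIM (what is proved, stated in full; the proofs are below) =====
def Claim_equal_preprocess_sent : Prop := ∀ (sent : String), Dom_preprocess_sent sent → Pre_preprocess_sent sent → Spec_preprocess_sent sent (preprocess_sent sent)

-- ===== LEMMAS AND PROOFS =====

-- no-two-adjacent-empty-segments relation
def pvR (a b : List Char) : Prop := a = [] → b ≠ []

lemma pvReSplit_ne_nil (w : List Char) : pvReSplit w ≠ [] := by
  cases w with
  | nil => simp [pvReSplit]
  | cons c t =>
    simp only [pvReSplit]
    split
    · rcases h : pvReSplit t with _ | ⟨seg, rest⟩ <;> simp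
    · simp

lemma pvReSplit_chain (w : List Char) : List.IsChain pvR (pvReSplit w) := by
  induction w with
  | nil => simp [pvReSplit]
  | cons c t ih =>
    simp only [pvReSplit]
    split
    · rcases h : pvReSplit t with _ | ⟨seg, rest⟩
      · simp
      · rw [h] at ih
        exact List.isChain_cons.mpr ⟨fun b _ => by simp [pvR], (List.isChain_cons.mp ih).2⟩
    · refine List.isChain_cons.mpr ⟨fun b hb => ?_, ?_⟩
      · intro _; simp at hb; subst hb; simp
      · exact List.isChain_cons.mpr ⟨fun b hb => fun h => by simp at h, ih⟩

lemma pvReSplit_concat (w : List Char) (c : Char) :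
    pvReSplit (w ++ [c]) =
      if pvIsKeep c then (pvReSplit w).dropLast ++ [((pvReSplit w).getLast?.getD []) ++ [c]]
      else pvReSplit w ++ [[c], []] := by
  induction w with
  | nil =>
    by_cases hc : pvIsKeep c = true <;> simp [pvReSplit, hc]
  | cons d t ih =>
    by_cases hd : pvIsKeep d = true
    · rw [List.cons_append]
      simp only [pvReSplit, hd, if_pos]
      rcases ht : pvReSplit t with _ | ⟨seg, rest⟩
      · exact absurd ht (pvReSplit_ne_nil t)
      · rw [ht] at ih
        by_cases hc : pvIsKeep c = true
        · rw [if_pos hc] at ih ⊢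
          rw [ih]
          cases rest with
          | nil => simp
          | cons r0 r1 =>
            rcases List.eq_nil_or_concat (r0 :: r1) with h | ⟨l', a, h⟩
            · simp at h
            · rw [h, List.concat_eq_append]
              simp only [List.dropLast_cons_of_ne_nil, List.cons_append, List.cons_ne_nil,
                ne_eq, not_false_eq_true, List.dropLast_concat, ← List.cons_append,
                List.getLast?_concat]
              simp
        · rw [if_neg hc] at ih ⊢
          rw [ih]
          simp
    · rw [List.cons_append]
      simp only [pvReSplit, hd, if_neg, Bool.not_eq_true]
      by_cases hc : pvIsKeep c = true
      · rw [if_pos hc] at ih ⊢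
        rw [ih]
        rcases ht : pvReSplit t with _ | ⟨seg, rest⟩
        · exact absurd ht (pvReSplit_ne_nil t)
        · rcases List.eq_nil_or_concat (seg :: rest) with h | ⟨l', a, h⟩
          · simp at h
          · rw [h, List.concat_eq_append]
            simp only [List.dropLast_cons_of_ne_nil, List.cons_append, List.cons_ne_nil,
              ne_eq, not_false_eq_true, List.dropLast_concat, ← List.cons_append,
              List.getLast?_concat]
      · rw [if_neg hc] at ih ⊢
        rw [ih]
        simp

lemma pv_dropLast_getLast (l : List (List Char)) (h : l ≠ []) :
    l.dropLast ++ [l.getLast?.getD []] = l := by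
  rcases List.eq_nil_or_concat l with h' | ⟨l', a, h'⟩
  · exact absurd h' h
  · simp [h']

lemma pvTail_suffix (w : List Char) : ((pvReSplit w).getLast?.getD []) <:+ w := by
  induction w using List.reverseRecOn with
  | nil => simp [pvReSplit]
  | append_singleton w c ih =>
    rw [pvReSplit_concat]
    by_cases hc : pvIsKeep c = true
    · rw [if_pos hc]
      simp only [List.getLast?_concat, Option.getD_some]
      obtain ⟨t, ht⟩ := ih
      exact ⟨t, by rw [← List.append_assoc, ht]⟩
    · rw [if_neg hc]
      have : pvReSplit w ++ [[c], []] = (pvReSplit w ++ [[c]]) ++ [([] : List Char)] := by simp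
      rw [this, List.getLast?_concat]
      simp

lemma pvInnerA_congr (w : List Char) (c : Char) (i : Nat) (hi : i < w.length) (st : Nat × List (List Char)) :
    pvInnerA (w ++ [c]) st i = pvInnerA w st i := by
  have hg : (w ++ [c]).getD i ' ' = w.getD i ' ' := List.getD_append _ _ _ _ hi
  have hs : PySem.List.slice (w ++ [c]) (some (st.1 : Int)) (some (i : Int)) =
      PySem.List.slice w (some (st.1 : Int)) (some (i : Int)) := by
    rw [PySem.List.slice_natCast, PySem.List.slice_natCast]
    by_cases hai : i ≤ st.1
    · simp [Nat.sub_eq_zero_of_le hai]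
    · rw [List.drop_append_of_le_length (by omega),
        List.take_append_of_le_length (by simp; omega)]
  simp only [pvInnerA, hg, hs]

lemma pvInnerA_fold (w : List Char) : ∀ proc : List (List Char),
    (List.range w.length).foldl (pvInnerA w) (0, proc) =
      (w.length - ((pvReSplit w).getLast?.getD []).length, proc ++ (pvReSplit w).dropLast) := by
  induction w using List.reverseRecOn with
  | nil => intro proc; simp [pvReSplit]
  | append_singleton w c ih =>
    intro proc
    have hlen : (w ++ [c]).length = w.length + 1 := by simp
    rw [hlen, List.range_succ, List.foldl_append,
      PySem.List.foldl_congr_mem _ (pvInnerA (w ++ [c])) (pvInnerA w) _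
        (fun st i hi => pvInnerA_congr w c i (List.mem_range.mp hi) st),
      ih proc]
    set L := (pvReSplit w).getLast?.getD [] with hLdef
    have hLsuf : L <:+ w := pvTail_suffix w
    have hLle : L.length ≤ w.length := hLsuf.length_le
    have hgd : (w ++ [c]).getD w.length ' ' = c := by simp [List.getD]
    rw [pvReSplit_concat]
    by_cases hal : PySem.Chars.isalnum c = true
    · have hk : pvIsKeep c = true := by simp [pvIsKeep, hal]
      rw [if_pos hk]
      simp only [pvInnerA, hgd, hal, if_pos, List.foldl_cons, List.foldl_nil]
      simp only [← hLdef, List.getLast?_concat, Option.getD_some, List.dropLast_concat,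
        List.length_append, List.length_singleton, Prod.mk.injEq]
      exact ⟨by omega, trivial⟩
    · by_cases hmem : c ∈ (['\'', '-'] : List Char)
      · have hk : pvIsKeep c = true := by
          rcases (by simpa using hmem : c = '\'' ∨ c = '-') with h | h <;> simp [pvIsKeep, h]
        rw [if_pos hk]
        simp only [pvInnerA, hgd, hal, Bool.false_eq_true, if_false, hmem, not_true_eq_false,
          if_false, List.foldl_cons, List.foldl_nil]
        simp only [← hLdef, List.getLast?_concat, Option.getD_some, List.dropLast_concat,
          List.length_append, List.length_singleton, Prod.mk.injEq]
        exact ⟨by omega, trivial⟩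
      · have hk : pvIsKeep c = false := by
          simp only [pvIsKeep, hal]
          simp at hmem
          simp [hmem.1, hmem.2]
        rw [if_neg (by simp [hk])]
        have hL2 : (pvReSplit w ++ [[c], []]).getLast?.getD [] = ([] : List Char) := by
          have h9 : pvReSplit w ++ [[c], []] = (pvReSplit w ++ [[c]]) ++ [([] : List Char)] := by simp
          rw [h9, List.getLast?_concat]; rfl
        have hF : (pvReSplit w ++ [[c], []]).dropLast = pvReSplit w ++ [[c]] := by
          have h9 : pvReSplit w ++ [[c], []] = (pvReSplit w ++ [[c]]) ++ [([] : List Char)] := by simp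
          rw [h9, List.dropLast_concat]
        rw [hL2, hF]
        simp only [pvInnerA, hgd, hal, Bool.false_eq_true, if_false, hmem, not_false_eq_true,
          if_pos, List.foldl_cons, List.foldl_nil]
        have hslice : PySem.List.slice (w ++ [c])
            (some ((w.length - L.length : Nat) : Int))
            (some ((w.length : Nat) : Int)) = L := by
          rw [PySem.List.slice_natCast]
          obtain ⟨t, ht⟩ := hLsuf
          have htl : t.length + L.length = w.length := by
            have h8 := congrArg List.length ht
            simpa using h8
          have hs1 : w.length - L.length = t.length := by omega
          rw [hs1, List.drop_append_of_le_length (by omega), ← ht, List.drop_left]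
          have hs2 : w.length - t.length = L.length := by omega
          rw [ht, hs2, List.take_append_of_le_length (le_refl _), List.take_length]
        rw [hslice]
        simp only [Prod.mk.injEq]
        constructor
        · simp only [List.length_nil]; omega
        · rw [← pv_dropLast_getLast (pvReSplit w) (pvReSplit_ne_nil w), ← hLdef]
          simp

lemma pvReSplit_ne_single (w : List Char) (h : w ≠ []) : pvReSplit w ≠ [[]] := by
  cases w with
  | nil => exact absurd rfl h
  | cons c t =>
    simp only [pvReSplit]
    split
    · rcases ht : pvReSplit t with _ | ⟨seg, rest⟩
      · simp
      · simp
    · simp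

-- the per-word processing of A and B produce the same parts, for any nonempty word
lemma pvStep_eq (w0 : List Char) (h0 : w0 ≠ []) (hsp : ∀ ch ∈ w0, PySem.Chars.isspace ch = false)
    (proc : List (List Char)) : pvStepA proc w0 = pvStepB proc w0 := by
  have hns : w0 ≠ [' '] := by
    intro h
    subst h
    have h1 := hsp ' ' (by simp)
    have h2 : PySem.Chars.isspace ' ' = true := by decide
    rw [h1] at h2
    exact Bool.false_ne_true h2
  rw [pvStepA, pvStepB, if_neg hns]
  set w := if w0 ≠ ['I'] then PySem.Chars.lower w0 else w0 with hw
  have hwne : w ≠ [] := by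
    rw [hw]
    split
    · simp only [PySem.Chars.lower]
      intro h; exact h0 (by simpa using h)
    · exact h0
  simp only [pvInnerA_fold w proc]
  set L := (pvReSplit w).getLast?.getD [] with hLdef
  have hLsuf : L <:+ w := pvTail_suffix w
  have hLle : L.length ≤ w.length := hLsuf.length_le
  by_cases hL : L = []
  · have hA : ¬ (w.length - L.length < w.length) := by rw [hL]; simp
    rw [if_neg hA, if_pos hL]
  · have hLpos : 0 < L.length := List.length_pos_of_ne_nil hL
    have hwpos : 0 < w.length := List.length_pos_of_ne_nil hwne
    have hA : w.length - L.length < w.length := by omega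
    rw [if_pos hA, if_neg hL]
    have hdrop : PySem.List.slice w (some ((w.length - L.length : Nat) : Int)) none = L := by
      rw [PySem.List.slice_from_natCast]
      obtain ⟨t, ht⟩ := hLsuf
      have htl : t.length + L.length = w.length := by simpa using congrArg List.length ht
      have hs1 : w.length - L.length = t.length := by omega
      rw [hs1, ← ht, List.drop_left]
    rw [hdrop, ← pv_dropLast_getLast (pvReSplit w) (pvReSplit_ne_nil w), ← hLdef]
    simp

lemma pvCapitalize_eq_nil (h : List Char) : pvCapitalize h = [] ↔ h = [] := by
  cases h <;> simp [pvCapitalize]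

lemma pvStepB_split (proc : List (List Char)) (w0 : List Char) :
    pvStepB proc w0 = proc ++ pvStepB [] w0 := by
  simp [pvStepB]

lemma pvParts_good (w0 : List Char) (h0 : w0 ≠ []) :
    pvStepB [] w0 ≠ [] ∧ List.IsChain pvR (pvStepB [] w0) ∧
      (pvStepB [] w0).getLast?.getD [] ≠ [] := by
  rw [pvStepB]
  set w := if w0 ≠ ['I'] then PySem.Chars.lower w0 else w0 with hw
  have hwne : w ≠ [] := by
    rw [hw]
    split
    · simp only [PySem.Chars.lower]
      intro h; exact h0 (by simpa using h)
    · exact h0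
  set L := (pvReSplit w).getLast?.getD [] with hLdef
  have hchain := pvReSplit_chain w
  have hpeq : (pvReSplit w).dropLast ++ [L] = pvReSplit w :=
    pv_dropLast_getLast (pvReSplit w) (pvReSplit_ne_nil w)
  by_cases hL : L = []
  · rw [if_pos hL]
    simp only [List.nil_append]
    have hFne : (pvReSplit w).dropLast ≠ [] := by
      intro hF
      rw [hF, hL] at hpeq
      exact pvReSplit_ne_single w hwne hpeq.symm
    have hch : List.IsChain pvR ((pvReSplit w).dropLast ++ [L]) := by rw [hpeq]; exact hchain
    have hca := List.isChain_append.mp hch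
    refine ⟨hFne, hca.1, ?_⟩
    rcases List.eq_nil_or_concat ((pvReSplit w).dropLast) with h' | ⟨F', fl, h'⟩
    · exact absurd h' hFne
    · rw [h', List.concat_eq_append, List.getLast?_concat]
      intro hfl
      simp only [Option.getD_some] at hfl
      have := hca.2.2 fl (by rw [h', List.concat_eq_append, List.getLast?_concat]; rfl) [] (by rw [hL]; rfl)
      exact this hfl rfl
  · rw [if_neg hL]
    simp only [List.nil_append]
    refine ⟨pvReSplit_ne_nil w, hchain, hL⟩

lemma pvFold_eq (ws : List (List Char))
    (hws : ∀ w ∈ ws, w ≠ [] ∧ ∀ ch ∈ w, PySem.Chars.isspace ch = false)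
    (proc : List (List Char)) : ws.foldl pvStepA proc = ws.foldl pvStepB proc :=
  PySem.List.foldl_congr_mem ws pvStepA pvStepB proc
    (fun acc x hx => pvStep_eq x (hws x hx).1 (hws x hx).2 acc)

lemma pvFold_good (ws : List (List Char)) (hws : ∀ w ∈ ws, w ≠ []) :
    ∀ proc : List (List Char), List.IsChain pvR proc → proc.getLast?.getD ['.'] ≠ [] →
      List.IsChain pvR (ws.foldl pvStepB proc) ∧
        (ws.foldl pvStepB proc).getLast?.getD ['.'] ≠ [] := by
  induction ws with
  | nil => exact fun proc h1 h2 => ⟨h1, h2⟩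
  | cons w ws ih =>
    intro proc h1 h2
    have hw := hws w (by simp)
    obtain ⟨hpne, hpch, hpl⟩ := pvParts_good w hw
    rw [List.foldl_cons, pvStepB_split]
    refine ih (fun x hx => hws x (by simp [hx])) _ ?_ ?_
    · refine List.isChain_append.mpr ⟨h1, hpch, ?_⟩
      intro x hx y hy
      intro hxe
      rcases List.eq_nil_or_concat proc with h' | ⟨p', a, h'⟩
      · rw [h'] at hx; simp at hx
      · rw [h', List.concat_eq_append, List.getLast?_concat] at hx h2
        simp only [Option.mem_def, Option.some.injEq] at hx
        simp only [Option.getD_some] at h2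
        exact absurd (hx ▸ hxe) (hx ▸ h2)
    · rcases List.eq_nil_or_concat (pvStepB [] w) with h' | ⟨p', a, h'⟩
      · exact absurd h' hpne
      · rw [h', List.concat_eq_append, ← List.append_assoc, List.getLast?_concat]
        rw [h', List.concat_eq_append, List.getLast?_concat] at hpl
        simpa using hpl

lemma pvRemove_first (pre : List (List Char)) (t : List (List Char)) (v : List Char)
    (hv : v ∉ pre) : PySem.List.remove? (pre ++ v :: t) v = some (pre ++ t) := by
  induction pre with
  | nil => simp
  | cons a pre ih =>
    have ha : a ≠ v := fun h => hv (by simp [h])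
    rw [List.cons_append, PySem.List.remove?_cons_of_ne _ ha,
      ih (fun h => hv (by simp [h]))]
    rfl

lemma pvRemoveLoop_ge (l : List (List Char)) (i : Nat) (fuel : Nat) (h : l.length ≤ i) :
    pvRemoveLoop l i fuel = l := by
  cases fuel with
  | zero => rfl
  | succ fuel => rw [pvRemoveLoop, if_neg (by omega)]

lemma pvGetD_mid (pre : List (List Char)) (x : List Char) (t : List (List Char)) :
    (pre ++ x :: t).getD pre.length [] = x := by
  simp [List.getD, List.getElem?_append_right (le_refl pre.length)]

lemma pvRemoveLoop_spec : ∀ (fuel : Nat) (pre suf : List (List Char)),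
    suf.length ≤ fuel → (∀ x ∈ pre, x ≠ []) → List.IsChain pvR suf →
    pvRemoveLoop (pre ++ suf) pre.length fuel = pre ++ suf.filter (· ≠ []) := by
  intro fuel
  induction fuel with
  | zero =>
    intro pre suf hlen _ _
    have : suf = [] := List.eq_nil_of_length_eq_zero (by omega)
    subst this
    simp [pvRemoveLoop]
  | succ fuel ih =>
    intro pre suf hlen hpre hch
    cases suf with
    | nil =>
      rw [pvRemoveLoop, if_neg (by simp)]
      simp
    | cons x t =>
      rw [pvRemoveLoop, if_pos (by simp), pvGetD_mid]
      by_cases hx : x = []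
      · rw [if_pos hx]
        subst hx
        rw [pvRemove_first pre t [] (fun h => hpre [] h rfl), Option.getD_some]
        cases t with
        | nil =>
          rw [pvRemoveLoop_ge _ _ _ (by simp)]
          simp
        | cons y t' =>
          have hy : y ≠ [] := by
            have := (List.isChain_cons_cons.mp hch).1
            exact this rfl
          have : pre ++ y :: t' = (pre ++ [y]) ++ t' := by simp
          rw [this, show pre.length + 1 = (pre ++ [y]).length by simp]
          have hz1 : ∀ z ∈ pre ++ [y], z ≠ [] := by
            intro z hz
            rcases List.mem_append.mp hz with h | h
            · exact hpre z h
            · simp at h; subst h; exact hy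
          rw [ih (pre ++ [y]) t' (by simp at hlen ⊢; omega) hz1
            ((List.isChain_cons_cons.mp hch).2.tail)]
          simp [List.filter_cons, hy]
      · rw [if_neg hx]
        have : pre ++ x :: t = (pre ++ [x]) ++ t := by simp
        rw [this, show pre.length + 1 = (pre ++ [x]).length by simp]
        have hz1 : ∀ z ∈ pre ++ [x], z ≠ [] := by
          intro z hz
          rcases List.mem_append.mp hz with h | h
          · exact hpre z h
          · simp at h; subst h; exact hx
        rw [ih (pre ++ [x]) t (by simp at hlen ⊢; omega) hz1
          ((List.isChain_cons.mp hch).2)]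
        simp [List.filter_cons, hx]


lemma pvSplitGo_good : ∀ (s : List Char) (cur : List Char) (acc : List (List Char)),
    (∀ x ∈ acc, x ≠ [] ∧ ∀ c ∈ x, PySem.Chars.isspace c = false) →
    (∀ c ∈ cur, PySem.Chars.isspace c = false) →
    ∀ w ∈ PySem.Chars.split₀.go s cur acc, w ≠ [] ∧ ∀ c ∈ w, PySem.Chars.isspace c = false := by
  intro s
  induction s with
  | nil =>
    intro cur acc hacc hcur w hw
    simp only [PySem.Chars.split₀.go] at hw
    split at hw
    · exact hacc w (by simpa using hw)
    · rename_i hne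
      rcases (by simpa using hw : w ∈ acc.reverse ∨ False ∨ w = cur.reverse) with h | h | h
      · exact hacc w (by simpa using h)
      · exact h.elim
      · subst h
        refine ⟨by simpa using fun h => hne (by simp [h]), fun c hc => hcur c (by simpa using hc)⟩
  | cons c rest ih =>
    intro cur acc hacc hcur w hw
    simp only [PySem.Chars.split₀.go] at hw
    split at hw
    · rename_i hsp
      split at hw
      · exact ih [] acc hacc (by simp) w hw
      · rename_i hne
        refine ih [] (cur.reverse :: acc) ?_ (by simp) w hw
        intro x hx
        rcases List.mem_cons.mp hx with hx | hx
        · subst hx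
          refine ⟨by simpa using fun h => hne (by simp [h]), fun d hd => hcur d (by simpa using hd)⟩
        · exact hacc x hx
    · rename_i hsp
      refine ih (c :: cur) acc hacc ?_ w hw
      intro d hd
      rcases List.mem_cons.mp hd with hd | hd
      · subst hd; simpa using hsp
      · exact hcur d hd

lemma pvSplit₀_good (s : List Char) : ∀ w ∈ PySem.Chars.split₀ s,
    w ≠ [] ∧ ∀ c ∈ w, PySem.Chars.isspace c = false := by
  intro w hw
  exact pvSplitGo_good s [] [] (by simp) (by simp) w hw

-- ===== VERDICT (by name: the statement is the Claim_ definition above) =====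
theorem preprocess_sent_spec : Claim_equal_preprocess_sent := by
  intro sent hdom hpre
  unfold Spec_preprocess_sent preprocess_sent preprocess_sent_alt
  dsimp only
  have hgood := pvSplit₀_good sent.toList
  have h0 : (PySem.Chars.split₀ sent.toList).foldl pvStepA [] =
      (PySem.Chars.split₀ sent.toList).foldl pvStepB [] :=
    pvFold_eq _ hgood []
  obtain ⟨hch, _⟩ := pvFold_good _ (fun w hw => (hgood w hw).1) [] (by simp) (by simp)
  rw [h0]
  set l0 := (PySem.Chars.split₀ sent.toList).foldl pvStepB [] with hl0
  set proc1 := if PySem.Chars.strIsalnum (l0.getLast?.getD []) then l0 ++ [['.']] else l0 with hp1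
  have hch1 : List.IsChain pvR proc1 := by
    rw [hp1]
    split
    · refine List.isChain_append.mpr ⟨hch, by simp, ?_⟩
      intro x hx y hy h
      simp only [List.head?_cons, Option.mem_def, Option.some.injEq] at hy
      subst hy
      simp
    · exact hch
  set proc2 := (match proc1 with
    | [] => ([] : List (List Char))
    | h :: t => pvCapitalize h :: t) with hp2
  have hch2 : List.IsChain pvR proc2 := by
    rw [hp2]
    match proc1, hch1 with
    | [], _ => simp
    | h :: t, hch1 =>
      refine List.isChain_cons.mpr ⟨?_, (List.isChain_cons.mp hch1).2⟩
      intro y hy hc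
      exact (List.isChain_cons.mp hch1).1 y hy ((pvCapitalize_eq_nil h).mp hc)
  have hrl := pvRemoveLoop_spec proc2.length [] proc2 (le_refl _) (by simp) hch2
  simp only [List.nil_append, List.length_nil] at hrl
  rw [hrl]
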